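-- pv_equiv track=rewrite | github.com/zaveshaa/CodeForces-RunCode | 2.py | solution
-- ===== SOURCE A (Python) =====
-- def solution(tasks):
--     tasks.sort()
--     total_time = 0
--     count = 0
--     for time in tasks:
--         if total_time + time <= 480:
--             total_time += time
--             count += 1
--         else:
--             break
--     return count
-- ===== SOURCE B (Python) =====
-- def solution(tasks):
--     # Sorts `tasks` in place, exactly like A does.
--     tasks.sort()
--     prefix = []
--     run = 0
--     for t in tasks:
--         run += t
--         prefix.append(run)
--     # binary search for the number of prefix sums <= 480 (they form a
--     # contiguous initial block because the sorted order makes the prefix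
--     # sums stay above 480 once they cross it)
--     lo, hi = 0, len(prefix)
--     while lo < hi:
--         mid = (lo + hi) // 2
--         if 480 < prefix[mid]:
--             hi = mid
--         else:
--             lo = mid + 1
--     return lo
-- ===== Notes on version B (the rewrite author's own statement) =====
-- stated objective: alternative
-- what changed: Replaces A's early-breaking greedy loop with a running (total,count) state by a two-phase computation: build the prefix-sum table of the sorted list, then binary-search it for the number of prefix sums <= 480.
import Mathlib
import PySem

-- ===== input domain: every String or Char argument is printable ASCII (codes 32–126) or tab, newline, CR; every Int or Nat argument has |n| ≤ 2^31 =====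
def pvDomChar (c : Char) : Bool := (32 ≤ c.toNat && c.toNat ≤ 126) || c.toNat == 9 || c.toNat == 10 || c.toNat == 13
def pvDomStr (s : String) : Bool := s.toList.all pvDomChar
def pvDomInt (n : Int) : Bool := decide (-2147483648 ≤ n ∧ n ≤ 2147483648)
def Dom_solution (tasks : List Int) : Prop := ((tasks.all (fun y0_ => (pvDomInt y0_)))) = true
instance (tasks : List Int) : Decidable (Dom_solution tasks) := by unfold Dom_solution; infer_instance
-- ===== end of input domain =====

-- B replaces A's early-breaking greedy loop by "build the prefix-sum table of the
-- sorted list, then binary-search it for the count of prefix sums ≤ 480" (alternative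
-- decomposition, same cost). Both Pythons sort `tasks` in place; the equivalence
-- proved here is about the return value.

-- ===== PORT A =====
-- the for-loop of A with its `break`: state (total_time, count)
def solutionLoopA : List Int → Int → Int → Int
  | [], _, count => count
  | t :: ts, total, count =>
    if total + t ≤ 480 then solutionLoopA ts (total + t) (count + 1) else count

def solution (tasks : List Int) : Int :=
  solutionLoopA (PySem.List.sorted tasks (fun x => x) false) 0 0

-- ===== PORT B =====
-- the `for t in tasks: run += t; prefix.append(run)` loop of Source B
def solutionPrefixB : List Int → Int → List Int
  | [], _ => []
  | t :: ts, run => (run + t) :: solutionPrefixB ts (run + t)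

-- the hand-written `while lo < hi` binary search of Source B; `prefix[mid]` is ported as
-- `getD mid 0`, exact here because the loop keeps mid < hi ≤ len(prefix)
def solutionBisectB (p : List Int) (lo hi : Nat) : Nat :=
  if lo < hi then
    let mid := (lo + hi) / 2
    if 480 < p.getD mid 0 then solutionBisectB p lo mid else solutionBisectB p (mid + 1) hi
  else lo
termination_by hi - lo
decreasing_by all_goals omega

def solution_alt (tasks : List Int) : Int :=
  let s := PySem.List.sorted tasks (fun x => x) false
  let pre := solutionPrefixB s 0
  ((solutionBisectB pre 0 pre.length : Nat) : Int)

-- ===== PRECONDITION & SPEC =====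
def Spec_solution (tasks : List Int) (out : Int) : Prop := out = solution_alt tasks
instance (tasks : List Int) (out : Int) : Decidable (Spec_solution tasks out) := by unfold Spec_solution; infer_instance

-- ===== CLAIM (what is proved, stated in full; the proofs are below) =====
def Claim_equal_solution : Prop := ∀ (tasks : List Int), Dom_solution tasks → Spec_solution tasks (solution tasks)

-- ===== LEMMAS AND PROOFS =====

theorem solutionPrefixB_length (s : List Int) (c : Int) :
    (solutionPrefixB s c).length = s.length := by
  induction s generalizing c with
  | nil => rfl
  | cons t ts ih => simp [solutionPrefixB, ih]

theorem solutionPrefixB_getElem (s : List Int) (c : Int) (i : Nat) (h : i < s.length) :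
    (solutionPrefixB s c)[i]'(by rw [solutionPrefixB_length]; exact h)
      = c + (s.take (i + 1)).sum := by
  induction s generalizing c i with
  | nil => simp at h
  | cons t ts ih =>
    cases i with
    | zero => simp [solutionPrefixB]
    | succ i =>
      have := ih (c + t) i (by simpa using h)
      simp [solutionPrefixB, this]
      ring

-- A's loop counts the prefix sums of its remaining input until the first one above 480
theorem solutionLoopA_eq (s : List Int) (total count : Int) :
    solutionLoopA s total count
      = count + (((solutionPrefixB s total).takeWhile (fun v => decide (v ≤ 480))).length : Int) := by
  induction s generalizing total count with
  | nil => simp [solutionLoopA, solutionPrefixB]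
  | cons t ts ih =>
    by_cases h : total + t ≤ 480
    · simp [solutionLoopA, solutionPrefixB, h, ih]
      ring
    · simp [solutionLoopA, solutionPrefixB, h]

theorem negsum (l : List Int) (hne : l ≠ [])
    (hneg : ∀ j (hj : j < l.length), l[j] < 0) : l.sum < 0 := by
  induction l with
  | nil => simp at hne
  | cons t ts ih =>
    have h0 : t < 0 := hneg 0 (by simp)
    cases ts with
    | nil => simpa using h0
    | cons u us =>
      have : (u :: us).sum < 0 := by
        apply ih (by simp)
        intro j hj
        have := hneg (j + 1) (by simpa using hj)
        simpa using this
      simp only [List.sum_cons] at this ⊢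
      omega

-- one step: once a prefix sum of the sorted list crosses 480 it stays above 480
theorem prefix_step (xs : List Int) (i : Nat)
    (h : i + 1 < (PySem.List.sorted xs (fun x => x) false).length)
    (hgt : 480 < (solutionPrefixB (PySem.List.sorted xs (fun x => x) false) 0)[i]'
      (by rw [solutionPrefixB_length]; omega)) :
    480 < (solutionPrefixB (PySem.List.sorted xs (fun x => x) false) 0)[i+1]'
      (by rw [solutionPrefixB_length]; exact h) := by
  set s := PySem.List.sorted xs (fun x => x) false with hs
  rw [solutionPrefixB_getElem s 0 i (by omega)] at hgt
  rw [solutionPrefixB_getElem s 0 (i+1) h]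
  have hsum : (s.take (i + 1 + 1)).sum = (s.take (i + 1)).sum + s[i+1] :=
    List.sum_take_succ s (i + 1) h
  by_cases hnn : 0 ≤ s[i+1]
  · omega
  · -- s[i+1] < 0: all earlier elements are < 0 too, so the prefix sum is negative
    exfalso
    have hlt : (s.take (i + 1)).sum < 0 := by
      apply negsum
      · have : (s.take (i+1)).length = i + 1 := by
          rw [List.length_take]; omega
        intro hnil; rw [hnil] at this; simp at this
      · intro j hj
        have hjlen : j < s.length := by
          rw [List.length_take] at hj; omega
        have hji : j ≤ i + 1 := by
          rw [List.length_take] at hj; omega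
        have hmono : s[j] ≤ s[i+1] :=
          PySem.List.sorted_id_getElem_mono xs hji h
        rw [List.getElem_take]
        omega
    omega

-- hence above-480 prefix sums are upward closed in the index
theorem prefix_mono (xs : List Int) (i j : Nat) (hij : i ≤ j)
    (hj : j < (PySem.List.sorted xs (fun x => x) false).length)
    (hgt : 480 < (solutionPrefixB (PySem.List.sorted xs (fun x => x) false) 0)[i]'
      (by rw [solutionPrefixB_length]; omega)) :
    480 < (solutionPrefixB (PySem.List.sorted xs (fun x => x) false) 0)[j]'
      (by rw [solutionPrefixB_length]; exact hj) := by
  induction j with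
  | zero =>
    have : i = 0 := by omega
    subst this; exact hgt
  | succ j ih =>
    by_cases hij' : i = j + 1
    · subst hij'; exact hgt
    · have hj' : j < (PySem.List.sorted xs (fun x => x) false).length := by omega
      exact prefix_step xs j hj (ih (by omega) hj' hgt)

-- the binary search returns k whenever index k splits p into (≤ 480) then (> 480)
theorem solutionBisectB_inv (p : List Int) (k : Nat)
    (h1 : ∀ j (hj : j < p.length), j < k → p[j] ≤ 480)
    (h2 : ∀ j (hj : j < p.length), k ≤ j → 480 < p[j]) :
    ∀ fuel lo hi, hi - lo ≤ fuel → lo ≤ k → k ≤ hi → hi ≤ p.length →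
      solutionBisectB p lo hi = k := by
  intro fuel
  induction fuel with
  | zero =>
    intro lo hi hf hlo hhi hlen
    rw [solutionBisectB]
    have : ¬ lo < hi := by omega
    simp [this]; omega
  | succ fuel ih =>
    intro lo hi hf hlo hhi hlen
    rw [solutionBisectB]
    by_cases hlh : lo < hi
    · simp only [hlh, if_true]
      have hmid : (lo + hi) / 2 < p.length := by omega
      have hget : p.getD ((lo + hi) / 2) 0 = p[(lo + hi) / 2] :=
        List.getD_eq_getElem p 0 hmid
      by_cases hc : 480 < p.getD ((lo + hi) / 2) 0
      · simp only [hc, if_true]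
        have hk : k ≤ (lo + hi) / 2 := by
          by_contra hk'
          have := h1 ((lo + hi) / 2) hmid (by omega)
          omega
        exact ih lo ((lo + hi) / 2) (by omega) hlo hk (by omega)
      · simp only [hc, if_false]
        have hk : (lo + hi) / 2 < k := by
          by_contra hk'
          have := h2 ((lo + hi) / 2) hmid (by omega)
          omega
        exact ih ((lo + hi) / 2 + 1) hi (by omega) (by omega) hhi hlen
    · simp [hlh]; omega

-- the split point of the prefix list is the length of its (≤ 480)-takeWhile
theorem takeWhile_split (p : List Int)
    (hmono : ∀ i j (hij : i ≤ j) (hj : j < p.length),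
       480 < p[i]'(by omega) → 480 < p[j]) :
    (∀ j (hj : j < p.length), j < (p.takeWhile (fun v => decide (v ≤ 480))).length → p[j] ≤ 480) ∧
    (∀ j (hj : j < p.length), (p.takeWhile (fun v => decide (v ≤ 480))).length ≤ j → 480 < p[j]) := by
  have hpre : p.takeWhile (fun v => decide (v ≤ 480)) <+: p :=
    List.takeWhile_prefix _
  have hklen : (p.takeWhile (fun v => decide (v ≤ 480))).length ≤ p.length := hpre.length_le
  constructor
  · intro j hj hjk
    have heq : (p.takeWhile (fun v => decide (v ≤ 480)))[j]'hjk = p[j] := hpre.getElem hjk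
    have hmem : (p.takeWhile (fun v => decide (v ≤ 480)))[j]'hjk
        ∈ p.takeWhile (fun v => decide (v ≤ 480)) := List.getElem_mem hjk
    have hdec := List.mem_takeWhile_imp hmem
    have hle : (p.takeWhile (fun v => decide (v ≤ 480)))[j]'hjk ≤ 480 := of_decide_eq_true hdec
    omega
  · intro j hj hjk
    have hklt : (p.takeWhile (fun v => decide (v ≤ 480))).length < p.length := by omega
    have hdne : p.dropWhile (fun v => decide (v ≤ 480)) ≠ [] := by
      intro hnil
      have happ := List.takeWhile_append_dropWhile
        (p := fun v : Int => decide (v ≤ 480)) (l := p)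
      rw [hnil, List.append_nil] at happ
      have : (p.takeWhile (fun v => decide (v ≤ 480))).length = p.length := by rw [happ]
      omega
    have hfail := List.head_dropWhile_not (fun v : Int => decide (v ≤ 480)) hdne
    have happ := List.takeWhile_append_dropWhile (p := fun v : Int => decide (v ≤ 480)) (l := p)
    obtain ⟨a, l, hcons⟩ := List.exists_cons_of_ne_nil hdne
    have e1 : p[(p.takeWhile (fun v => decide (v ≤ 480))).length]?
        = some ((p.dropWhile (fun v => decide (v ≤ 480))).head hdne) := by
      have hr := List.getElem?_append_right
        (l₁ := p.takeWhile (fun v => decide (v ≤ 480)))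
        (l₂ := p.dropWhile (fun v => decide (v ≤ 480)))
        (i := (p.takeWhile (fun v => decide (v ≤ 480))).length) (le_refl _)
      rw [happ] at hr
      rw [hr, Nat.sub_self]
      simp [hcons]
    have e2 : p[(p.takeWhile (fun v => decide (v ≤ 480))).length]?
        = some (p[(p.takeWhile (fun v => decide (v ≤ 480))).length]'hklt) :=
      List.getElem?_eq_getElem hklt
    have hhead : ¬ ((p.dropWhile (fun v => decide (v ≤ 480))).head hdne ≤ 480) :=
      of_decide_eq_false hfail
    have hfirst : 480 < p[(p.takeWhile (fun v => decide (v ≤ 480))).length]'hklt := by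
      rw [e1] at e2
      have := Option.some.inj e2
      omega
    exact hmono _ j hjk hj hfirst

-- ===== VERDICT (by name: the statement is the Claim_ definition above) =====
theorem solution_spec : Claim_equal_solution := by
  intro tasks _
  show solutionLoopA (PySem.List.sorted tasks (fun x => x) false) 0 0
      = ((solutionBisectB (solutionPrefixB (PySem.List.sorted tasks (fun x => x) false) 0) 0
          (solutionPrefixB (PySem.List.sorted tasks (fun x => x) false) 0).length : Nat) : Int)
  set s := PySem.List.sorted tasks (fun x => x) false with hs
  set p := solutionPrefixB s 0 with hp
  have hplen : p.length = s.length := solutionPrefixB_length s 0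
  have hmono : ∀ i j (hij : i ≤ j) (hj : j < p.length),
      480 < p[i]'(by omega) → 480 < p[j] := by
    intro i j hij hj hgt
    have hj' : j < s.length := by omega
    exact prefix_mono tasks i j hij (hs ▸ hj') hgt
  obtain ⟨h1, h2⟩ := takeWhile_split p hmono
  have hkle : (p.takeWhile (fun v => decide (v ≤ 480))).length ≤ p.length :=
    (List.takeWhile_prefix _).length_le
  have hb : solutionBisectB p 0 p.length = (p.takeWhile (fun v => decide (v ≤ 480))).length :=
    solutionBisectB_inv p _ h1 h2 p.length 0 p.length (by omega) (by omega) hkle (le_refl _)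
  rw [solutionLoopA_eq s 0 0, ← hp, hb]
  simp
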